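-- pv_equiv track=rewrite | github.com/babilionllc-coder/jegodigital | website/launch_campaign.py | clean_company_name
-- ===== SOURCE A (Python) =====
-- def clean_company_name(title):
--     """Extracts the likely company name from the page title."""
--     if not title: return "su empresa"
--     separators = ['|', '-', ':', '–', '—']
--     clean_title = title
--     for sep in separators:
--         if sep in clean_title:
--             clean_title = clean_title.split(sep)[0]
--     return clean_title.strip()
-- ===== SOURCE B (Python) =====
-- def clean_company_name(title):
--     """Extracts the likely company name from the page title."""
--     if not title: return "su empresa"
--     separators = ['|', '-', ':', '–', '—']
--     indices = [title.index(sep) for sep in separators if sep in title]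
--     cut = min(indices) if indices else len(title)
--     return title[:cut].strip()
-- ===== Notes on version B (the rewrite author's own statement) =====
-- stated objective: simpler
-- what changed: Replaces the repeated split-and-overwrite loop (each present separator re-splits and rebinds the working string) by one pass that finds the earliest occurrence of any separator and takes a single slice up to it.
import Mathlib
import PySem

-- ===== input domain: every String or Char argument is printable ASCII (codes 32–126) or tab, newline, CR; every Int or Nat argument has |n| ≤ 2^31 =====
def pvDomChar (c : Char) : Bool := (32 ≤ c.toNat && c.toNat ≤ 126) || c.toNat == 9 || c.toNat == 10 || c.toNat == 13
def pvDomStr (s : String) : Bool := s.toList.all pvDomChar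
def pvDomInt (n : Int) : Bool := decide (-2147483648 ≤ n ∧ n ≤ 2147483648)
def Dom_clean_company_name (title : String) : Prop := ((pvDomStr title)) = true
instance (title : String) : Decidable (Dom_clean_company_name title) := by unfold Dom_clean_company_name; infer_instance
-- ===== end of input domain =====

-- B replaces A's repeated split-and-overwrite loop by locating the earliest occurrence of any
-- separator and taking a single slice up to it (objective: simpler; same exact return value).

-- ===== PORT A =====
-- A: loop over the separators; whenever one occurs in the working string, replace the working
-- string by the piece before its first occurrence (split(sep)[0]); finally strip.
def clean_company_name (title : String) : String :=
  if title = "" then "su empresa" else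
    let separators : List (List Char) := [['|'], ['-'], [':'], ['–'], ['—']]
    let cleanTitle :=
      separators.foldl
        (fun s sep => if PySem.Chars.isIn sep s then (PySem.Chars.splitOn s sep).headD [] else s)
        title.toList
    String.mk (PySem.Chars.strip cleanTitle)

-- ===== PORT B =====
-- B: collect the first-occurrence index of each separator present, cut at the minimum (or at the
-- end if none is present), strip once.  (title.index(sep) for a present sep = PySem.Chars.find.)
def clean_company_name_alt (title : String) : String :=
  if title = "" then "su empresa" else
    let separators : List (List Char) := [['|'], ['-'], [':'], ['–'], ['—']]
    let indices :=
      (separators.filter (fun sep => PySem.Chars.isIn sep title.toList)).map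
        (fun sep => PySem.Chars.find title.toList sep)
    let cut : Int :=
      match PySem.List.min? indices (fun x => x) with
      | some m => m
      | none => PySem.Str.len title
    String.mk (PySem.Chars.strip (PySem.Chars.slice title.toList none (some cut)))

-- ===== PRECONDITION & SPEC =====
def Spec_clean_company_name (title : String) (out : String) : Prop := out = clean_company_name_alt title
instance (title : String) (out : String) : Decidable (Spec_clean_company_name title out) := by unfold Spec_clean_company_name; infer_instance

-- ===== CLAIM (what is proved, stated in full; the proofs are below) =====
def Claim_equal_clean_company_name : Prop := ∀ (title : String), Dom_clean_company_name title → Spec_clean_company_name title (clean_company_name title)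

-- ===== LEMMAS AND PROOFS =====

-- splitOn's worker ignores an already-accumulated suffix of pieces.
theorem pv_go_acc (sep : List Char) : ∀ (fuel : Nat) (l cur : List Char) (acc1 acc2 : List (List Char)),
    PySem.Chars.splitOn.go sep fuel l cur (acc1 ++ acc2)
      = acc2.reverse ++ PySem.Chars.splitOn.go sep fuel l cur acc1 := by
  intro fuel
  induction fuel with
  | zero =>
    intro l cur acc1 acc2
    rw [PySem.Chars.splitOn.go.eq_def, PySem.Chars.splitOn.go.eq_def]
    simp
  | succ n ih =>
    intro l cur acc1 acc2
    rw [PySem.Chars.splitOn.go.eq_def, PySem.Chars.splitOn.go.eq_def]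
    cases l with
    | nil => simp
    | cons c rest =>
      by_cases hp : sep.isPrefixOf (c :: rest) = true
      · simp only [hp, if_true]
        have := ih (List.drop sep.length (c :: rest)) [] (cur.reverse :: acc1) acc2
        simpa using this
      · simp only [hp]
        exact ih rest (c :: cur) acc1 acc2

-- The first piece a single-char split produces is cur.reverse ++ the ≠-a prefix.
theorem pv_go_first (a : Char) : ∀ (fuel : Nat) (l cur : List Char), l.length ≤ fuel →
    ∃ rest, PySem.Chars.splitOn.go [a] fuel l cur []
      = (cur.reverse ++ l.takeWhile (· ≠ a)) :: rest := by
  intro fuel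
  induction fuel with
  | zero =>
    intro l cur h
    have : l = [] := List.eq_nil_of_length_eq_zero (Nat.le_zero.mp h)
    subst this
    rw [PySem.Chars.splitOn.go.eq_def]
    exact ⟨[], by simp⟩
  | succ n ih =>
    intro l cur h
    rw [PySem.Chars.splitOn.go.eq_def]
    cases l with
    | nil => exact ⟨[], by simp⟩
    | cons c rest =>
      by_cases hc : c = a
      · subst hc
        have hp : ([c].isPrefixOf (c :: rest)) = true := by simp [List.isPrefixOf]
        simp only [hp, if_true]
        rw [show ((cur.reverse :: []) : List (List Char)) = [] ++ [cur.reverse] by simp]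
        rw [pv_go_acc]
        simp
      · have hp : ([a].isPrefixOf (c :: rest)) = false := by simp [List.isPrefixOf, Ne.symm hc]
        simp only [hp]
        obtain ⟨r, hr⟩ := ih rest (c :: cur) (by simpa using Nat.lt_succ_iff.mp (by simpa using h))
        refine ⟨r, ?_⟩
        rw [hr]
        simp [hc]

theorem pv_splitOn_head (a : Char) (l : List Char) :
    (PySem.Chars.splitOn l [a]).headD [] = l.takeWhile (· ≠ a) := by
  obtain ⟨r, hr⟩ := pv_go_first a (l.length + 1) l [] (Nat.le_succ _)
  rw [PySem.Chars.splitOn, hr]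
  simp

theorem pv_isIn_singleton (a : Char) (l : List Char) :
    PySem.Chars.isIn [a] l = true ↔ a ∈ l := by
  rw [PySem.Chars.isIn_iff_infix]
  exact List.singleton_infix_iff a l

-- One step of A's loop is a takeWhile, whether or not the separator occurs.
theorem pv_stepEq (a : Char) (l : List Char) :
    (if PySem.Chars.isIn [a] l then (PySem.Chars.splitOn l [a]).headD [] else l)
      = l.takeWhile (· ≠ a) := by
  by_cases h : PySem.Chars.isIn [a] l = true
  · rw [if_pos h, pv_splitOn_head]
  · rw [if_neg (by simp [h])]
    have ha : a ∉ l := fun hm => h ((pv_isIn_singleton a l).mpr hm)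
    exact (List.takeWhile_eq_self_iff.mpr (fun x hx => by
      simp only [decide_eq_true_eq]
      exact fun hxa => ha (hxa ▸ hx))).symm

-- A's whole loop over single-char separators is one takeWhile.
theorem pv_aCore : ∀ (cs : List Char) (l : List Char),
    (cs.map (fun a => ([a] : List Char))).foldl
        (fun s sep => if PySem.Chars.isIn sep s then (PySem.Chars.splitOn s sep).headD [] else s) l
      = l.takeWhile (fun c => !cs.contains c) := by
  intro cs
  induction cs with
  | nil =>
    intro l
    exact (List.takeWhile_eq_self_iff.mpr (by simp)).symm
  | cons a cs ih =>
    intro l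
    simp only [List.map_cons, List.foldl_cons]
    rw [pv_stepEq, ih, List.takeWhile_takeWhile]
    congr 1
    funext c
    by_cases hc : c = a <;> simp [hc]

theorem pv_tw_len (a : Char) : ∀ (l : List Char) (k : Nat),
    [a] <+: l.drop k → (∀ i < k, ¬ [a] <+: l.drop i) →
    (l.takeWhile (· ≠ a)).length = k := by
  intro l
  induction l with
  | nil =>
    intro k h _
    simp at h
  | cons c t ih =>
    intro k h hmin
    cases k with
    | zero =>
      simp only [List.drop_zero] at h
      have : c = a := by
        rcases h with ⟨s, hs⟩
        simp [List.cons_eq_cons] at hs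
        exact hs.1.symm
      simp [this]
    | succ k =>
      have hc : c ≠ a := by
        intro hca
        exact hmin 0 (Nat.succ_pos k) (by simp [hca])
      have hmin' : ∀ i < k, ¬ [a] <+: t.drop i := by
        intro i hi
        exact hmin (i + 1) (Nat.succ_lt_succ hi)
      have := ih k (by simpa using h) hmin'
      simp only [ne_eq, decide_not] at this
      simp [hc, this]

-- For a present character, find returns the length of the ≠-a prefix.
theorem pv_find_singleton (a : Char) (l : List Char) (h : a ∈ l) :
    PySem.Chars.find l [a] = ((l.takeWhile (· ≠ a)).length : Int) := by
  have h0 : 0 ≤ PySem.Chars.find l [a] :=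
    (PySem.Chars.find_nonneg_iff l [a]).mpr ((List.singleton_infix_iff a l).mpr h)
  obtain ⟨h1, h2⟩ := PySem.Chars.find_spec h0
  have := pv_tw_len a l (PySem.Chars.find l [a]).toNat h1 h2
  omega

theorem pv_len_takeWhile_min (p q : Char → Bool) : ∀ (l : List Char),
    (l.takeWhile (fun c => p c && q c)).length
      = min (l.takeWhile p).length (l.takeWhile q).length := by
  intro l
  induction l with
  | nil => simp
  | cons c t ih =>
    by_cases hp : p c = true <;> by_cases hq : q c = true <;>
      simp [hp, hq, ih] <;> omega

theorem pv_foldl_min_shift : ∀ (t : List Int) (x y : Int),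
    t.foldl min (min x y) = min x (t.foldl min y) := by
  intro t
  induction t with
  | nil => intro x y; rfl
  | cons z t ih =>
    intro x y
    simp only [List.foldl_cons]
    rw [min_assoc, ih]

theorem pv_absent_takeWhile (cs l : List Char) (h : ∀ c ∈ cs, c ∉ l) :
    l.takeWhile (fun c => !cs.contains c) = l := by
  apply List.takeWhile_eq_self_iff.mpr
  intro x hx
  simp only [Bool.not_eq_true', List.contains_eq_mem, decide_eq_false_iff_not]
  exact fun hxc => h x hxc hx

-- B's cut (min of first-occurrence indices, defaulting to the length) is the length of the
-- same takeWhile prefix.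
theorem pv_bCut : ∀ (cs : List Char) (l : List Char),
    (match PySem.List.min?
        (((cs.map (fun a => ([a] : List Char))).filter
            (fun sep => PySem.Chars.isIn sep l)).map
          (fun sep => PySem.Chars.find l sep)) (fun x => x) with
      | some m => m
      | none => (l.length : Int))
      = ((l.takeWhile (fun c => !cs.contains c)).length : Int) := by
  intro cs
  induction cs with
  | nil =>
    intro l
    simp only [List.map_nil, List.filter_nil]
    rw [show (PySem.List.min? ([] : List Int) (fun x => x)) = none from rfl]
    rw [List.takeWhile_eq_self_iff.mpr (by simp)]
  | cons a cs ih =>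
    intro l
    have hsplit : (l.takeWhile (fun c => !(a :: cs).contains c)).length
        = min (l.takeWhile (· ≠ a)).length (l.takeWhile (fun c => !cs.contains c)).length := by
      rw [show (fun c => !(a :: cs).contains c)
            = (fun c => (decide (c ≠ a)) && !cs.contains c) by
          funext c; by_cases hc : c = a <;> simp [hc]]
      exact pv_len_takeWhile_min _ _ l
    by_cases ha : a ∈ l
    · have hin : PySem.Chars.isIn [a] l = true := (pv_isIn_singleton a l).mpr ha
      simp only [List.map_cons, List.filter_cons, hin, if_true]
      rw [PySem.List.min?_id_cons]
      have hfind := pv_find_singleton a l ha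
      cases hrest : ((cs.map (fun a => ([a] : List Char))).filter
            (fun sep => PySem.Chars.isIn sep l)).map
          (fun sep => PySem.Chars.find l sep) with
      | nil =>
        simp only [List.foldl_nil]
        have hall : ∀ c ∈ cs, c ∉ l := by
          intro c hc hcl
          have : ([c] : List Char) ∈ (cs.map (fun a => ([a] : List Char))).filter
              (fun sep => PySem.Chars.isIn sep l) := by
            rw [List.mem_filter]
            exact ⟨List.mem_map.mpr ⟨c, hc, rfl⟩, (pv_isIn_singleton c l).mpr hcl⟩
          have : PySem.Chars.find l [c] ∈ (((cs.map (fun a => ([a] : List Char))).filter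
              (fun sep => PySem.Chars.isIn sep l)).map (fun sep => PySem.Chars.find l sep)) :=
            List.mem_map.mpr ⟨[c], this, rfl⟩
          rw [hrest] at this
          simp at this
        have hNcs := pv_absent_takeWhile cs l hall
        rw [hsplit, hNcs]
        have hle : (l.takeWhile (· ≠ a)).length ≤ l.length := (List.takeWhile_prefix _).length_le
        omega
      | cons y t =>
        have ihv := ih l
        rw [hrest] at ihv
        rw [PySem.List.min?_id_cons] at ihv
        have ihv2 : t.foldl min y
            = ((l.takeWhile (fun c => !cs.contains c)).length : Int) := ihv
        simp only [List.foldl_cons]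
        rw [pv_foldl_min_shift t (PySem.Chars.find l [a]) y, ihv2, hfind, hsplit]
        push_cast
        omega
    · have hnin : PySem.Chars.isIn [a] l = false := by
        rw [PySem.Chars.isIn_eq_false_iff]
        exact fun hi => ha ((List.singleton_infix_iff a l).mp hi)
      simp only [List.map_cons, List.filter_cons, hnin, Bool.false_eq_true, if_false]
      rw [ih l, hsplit]
      have htw : (l.takeWhile (· ≠ a)) = l :=
        List.takeWhile_eq_self_iff.mpr (fun x hx => by
          simp only [decide_eq_true_eq]
          exact fun hxa => ha (hxa ▸ hx))
      have hle : (l.takeWhile (fun c => !cs.contains c)).length ≤ l.length :=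
        (List.takeWhile_prefix _).length_le
      rw [htw]
      omega

-- ===== VERDICT (by name: the statement is the Claim_ definition above) =====
theorem clean_company_name_spec : Claim_equal_clean_company_name := by
  intro title _
  unfold Spec_clean_company_name clean_company_name clean_company_name_alt
  by_cases h : title = ""
  · simp [h]
  · simp only [h, if_false]
    have hA := pv_aCore ['|', '-', ':', '–', '—'] title.toList
    have hB := pv_bCut ['|', '-', ':', '–', '—'] title.toList
    simp only [List.map_cons, List.map_nil] at hA hB
    rw [hA]
    have hlen : PySem.Str.len title = (title.toList.length : Int) := by
      simp [PySem.Str.len_eq]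
    rw [hlen, hB]
    simp only [PySem.Chars.slice_eq_listSlice]
    rw [PySem.List.slice_to_natCast]
    rw [← List.prefix_iff_eq_take.mp (List.takeWhile_prefix _)]
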